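-- pv_equiv track=rewrite | github.com/symbiotic-engineering/MDOcean | dev/docs/add_docstrings.py | extract_classdef_name
-- ===== SOURCE A (Python) =====
-- def extract_classdef_name(content):
--     """Extract class name from classdef statement."""
--     lines = content.split('\n')
--     for line in lines:
--         stripped = line.lstrip()
--         if stripped.startswith('classdef '):
--             # Extract name: classdef ClassName
--             parts = stripped.split()
--             if len(parts) >= 2:
--                 return parts[1].split('<')[0].split('&')[0].strip()
--     return None
-- ===== SOURCE B (Python) =====
-- import re
--
-- # One anchored multiline regex over the whole content instead of a per-line
-- # split/lstrip/startswith/split pipeline. [^\S\n] = whitespace except newline.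
-- _CLASSDEF_RE = re.compile(r'^[^\S\n]*classdef [^\S\n]*(\S+)', re.MULTILINE)
--
--
-- def extract_classdef_name(content):
--     """Extract class name from classdef statement."""
--     m = _CLASSDEF_RE.search(content)
--     if m is None:
--         return None
--     return m.group(1).split('<')[0].split('&')[0]
-- ===== Notes on version B (the rewrite author's own statement) =====
-- stated objective: idiomatic
-- what changed: Replaced the per-line split/lstrip/startswith/whitespace-split loop by a single anchored multiline regex search over the whole content, truncating the captured token afterwards.
import Mathlib
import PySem

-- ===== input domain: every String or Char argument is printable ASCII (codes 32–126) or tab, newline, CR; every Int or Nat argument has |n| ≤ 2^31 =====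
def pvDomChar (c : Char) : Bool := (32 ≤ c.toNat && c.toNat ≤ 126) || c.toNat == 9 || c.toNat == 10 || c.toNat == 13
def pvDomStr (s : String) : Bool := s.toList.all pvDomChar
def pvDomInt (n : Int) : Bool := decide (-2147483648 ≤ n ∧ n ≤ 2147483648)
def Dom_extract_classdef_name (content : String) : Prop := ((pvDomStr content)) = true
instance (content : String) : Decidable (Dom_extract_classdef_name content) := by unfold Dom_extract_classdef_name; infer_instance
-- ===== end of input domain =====

-- B replaces A's per-line split/lstrip/startswith/split() loop by one anchored
-- multiline regex-style search over the whole content (idiomatic, same cost).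


-- ===== PORT A =====
-- the for-loop over content.split('\n'): lstrip, startswith, split(), index, truncate, strip
def pvA_loop : List (List Char) → Option String
  | [] => none
  | line :: rest =>
    let stripped := PySem.Chars.lstrip line
    if PySem.Chars.startswith stripped "classdef ".toList then
      let parts := PySem.Chars.split₀ stripped
      if 2 ≤ parts.length then
        let p1 := (PySem.List.pyGet? parts 1).getD []
        let q1 := (PySem.List.pyGet? (PySem.Chars.splitOn p1 ['<']) 0).getD []
        let q2 := (PySem.List.pyGet? (PySem.Chars.splitOn q1 ['&']) 0).getD []
        some (String.ofList (PySem.Chars.strip q2))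
      else pvA_loop rest
    else pvA_loop rest

def extract_classdef_name (content : String) : Option String :=
  pvA_loop (PySem.Chars.splitOn content.toList ['\n'])

-- ===== PORT B =====
-- hand port of Source B's regex r'^[^\S\n]*classdef [^\S\n]*(\S+)' in MULTILINE mode:
-- [^\S\n] is Python whitespace other than '\n'
def pvBws (c : Char) : Bool := PySem.Chars.isspace c && c ≠ '\n'

-- exact match attempt of the pattern at one anchored position: the greedy
-- whitespace runs admit no backtracking ('c' resp. \S are not whitespace),
-- so the regex match at a fixed position is this deterministic scan
def pvBtryAt (cs : List Char) : Option (List Char) :=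
  let t := cs.dropWhile pvBws
  if "classdef ".toList.isPrefixOf t then
    let name := ((t.drop 9).dropWhile pvBws).takeWhile (fun c => !PySem.Chars.isspace c)
    if name.isEmpty then none else some name
  else none

-- re.search with a '^'-anchored MULTILINE pattern: try position 0 and the
-- position after each '\n', left to right (leftmost match wins)
mutual
def pvBsearch : List Char → Option (List Char)
  | cs =>
    match pvBtryAt cs with
    | some name => some name
    | none => pvBskip cs
termination_by cs => (cs.length, 1)
def pvBskip : List Char → Option (List Char)
  | [] => none
  | c :: rest => if c = '\n' then pvBsearch rest else pvBskip rest
termination_by cs => (cs.length, 0)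
end

def extract_classdef_name_alt (content : String) : Option String :=
  match pvBsearch content.toList with
  | none => none
  | some name => some (String.ofList ((name.takeWhile (· ≠ '<')).takeWhile (· ≠ '&')))

-- ===== PRECONDITION & SPEC =====
def Spec_extract_classdef_name (content : String) (out : Option String) : Prop := out = extract_classdef_name_alt content
instance (content : String) (out : Option String) : Decidable (Spec_extract_classdef_name content out) := by unfold Spec_extract_classdef_name; infer_instance

-- ===== CLAIM (what is proved, stated in full; the proofs are below) =====
def Claim_equal_extract_classdef_name : Prop := ∀ (content : String), Dom_extract_classdef_name content → Spec_extract_classdef_name content (extract_classdef_name content)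

-- ===== LEMMAS AND PROOFS =====

-- ===== proof helpers =====
def pvNS (c : Char) : Bool := !PySem.Chars.isspace c

def pvWords : List Char → List Char → List (List Char)
  | cur, [] => if cur.isEmpty then [] else [cur.reverse]
  | cur, c :: rest =>
    if PySem.Chars.isspace c then
      if cur.isEmpty then pvWords [] rest else cur.reverse :: pvWords [] rest
    else pvWords (c :: cur) rest

theorem pvGo_eq_words : ∀ (s cur : List Char) (accs : List (List Char)),
    PySem.Chars.split₀.go s cur accs = accs.reverse ++ pvWords cur s := by
  intro s
  induction s with
  | nil =>
    intro cur accs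
    by_cases h : cur.isEmpty <;> simp [PySem.Chars.split₀.go, pvWords, h]
  | cons c rest ih =>
    intro cur accs
    by_cases hs : PySem.Chars.isspace c
    · by_cases hc : cur.isEmpty <;>
        simp [PySem.Chars.split₀.go, pvWords, hs, hc, ih]
    · simp [PySem.Chars.split₀.go, pvWords, hs, ih]

theorem split₀_eq (s : List Char) : PySem.Chars.split₀ s = pvWords [] s := by
  simpa using pvGo_eq_words s [] []

def pvSplitC (c : Char) : List Char → List Char → List (List Char)
  | pre, [] => [pre.reverse]
  | pre, d :: rest => if d = c then pre.reverse :: pvSplitC c [] rest else pvSplitC c (d :: pre) rest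

theorem pvGoSplit_eq (c : Char) : ∀ (fuel : Nat) (l cur : List Char) (acc : List (List Char)),
    l.length < fuel → PySem.Chars.splitOn.go [c] fuel l cur acc = acc.reverse ++ pvSplitC c cur l := by
  intro fuel
  induction fuel with
  | zero => intro l cur acc h; omega
  | succ f ih =>
    intro l cur acc h
    cases l with
    | nil => simp [PySem.Chars.splitOn.go, pvSplitC]
    | cons d rest =>
      by_cases hd : d = c
      · subst hd
        have hpre : [d].isPrefixOf (d :: rest) = true := by simp [List.isPrefixOf]
        simp only [PySem.Chars.splitOn.go, hpre, if_true, List.length_cons, List.length_nil,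
          List.drop_succ_cons, List.drop_zero]
        rw [ih rest [] (cur.reverse :: acc) (by simpa using Nat.lt_of_succ_lt_succ h)]
        simp [pvSplitC]
      · have hpre : [c].isPrefixOf (d :: rest) = false := by
          simp [List.isPrefixOf]; exact fun hh => (hd hh.symm).elim
        simp only [PySem.Chars.splitOn.go, hpre, Bool.false_eq_true, if_false, pvSplitC, hd]
        rw [ih rest (d :: cur) acc (by simpa using Nat.lt_of_succ_lt_succ h)]

theorem splitOn_char (s : List Char) (c : Char) : PySem.Chars.splitOn s [c] = pvSplitC c [] s := by
  simpa using pvGoSplit_eq c (s.length + 1) s [] [] (by omega)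

def pvTailC (c : Char) : List Char → List (List Char)
  | [] => []
  | _ :: r => pvSplitC c [] r

theorem pvSplitC_eq (c : Char) : ∀ (l pre : List Char),
    pvSplitC c pre l = (pre.reverse ++ l.takeWhile (· ≠ c)) ::
      pvTailC c (l.dropWhile (· ≠ c)) := by
  intro l
  induction l with
  | nil => intro pre; simp [pvSplitC, pvTailC]
  | cons d rest ih =>
    intro pre
    by_cases hd : d = c
    · subst hd
      simp [pvSplitC, pvTailC, List.takeWhile_cons, List.dropWhile_cons]
    · simp only [pvSplitC, if_neg hd, List.takeWhile_cons, List.dropWhile_cons,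
        decide_eq_true_eq, hd, not_false_iff, if_pos, decide_not]
      rw [ih (d :: pre)]
      simp [hd]

theorem splitOn_head (s : List Char) (c : Char) :
    (PySem.List.pyGet? (PySem.Chars.splitOn s [c]) 0).getD [] = s.takeWhile (· ≠ c) := by
  rw [splitOn_char, pvSplitC_eq]
  simp [PySem.List.pyGet?, PySem.List.pyIdx?]

theorem pvWords_skip : ∀ (r : List Char),
    pvWords [] r = pvWords [] (r.dropWhile PySem.Chars.isspace) := by
  intro r
  induction r with
  | nil => rfl
  | cons c rest ih =>
    by_cases hs : PySem.Chars.isspace c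
    · rw [List.dropWhile_cons_of_pos hs, ← ih]; simp [pvWords, hs]
    · rw [List.dropWhile_cons_of_neg hs]

theorem pvWords_head : ∀ (r cur : List Char), cur ≠ [] →
    pvWords cur r = (cur.reverse ++ r.takeWhile pvNS) :: pvWords [] (r.dropWhile pvNS) := by
  intro r
  induction r with
  | nil =>
    intro cur h
    simp [pvWords, List.isEmpty_iff, h, pvNS]
  | cons c rest ih =>
    intro cur h
    by_cases hs : PySem.Chars.isspace c
    · have hns : pvNS c = false := by simp [pvNS, hs]
      simp [pvWords, hs, List.isEmpty_iff, h, List.takeWhile_cons, List.dropWhile_cons, hns]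
    · have hns : pvNS c = true := by simp [pvNS, hs]
      simp only [pvWords, hs, Bool.false_eq_true, if_false, List.takeWhile_cons, hns, if_true,
        List.dropWhile_cons]
      rw [ih (c :: cur) (by simp)]
      simp

theorem pvHead_dropWhile_false (p : Char → Bool) : ∀ (l : List Char) (x : Char) (xs : List Char),
    l.dropWhile p = x :: xs → p x = false := by
  intro l
  induction l with
  | nil => intro x xs h; simp at h
  | cons a t ih =>
    intro x xs h
    by_cases hp : p a
    · rw [List.dropWhile_cons_of_pos hp] at h; exact ih x xs h
    · rw [List.dropWhile_cons_of_neg hp] at h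
      cases h; simpa using hp

theorem pvDropWhile_all_false (p : Char → Bool) : ∀ (l : List Char),
    (∀ c ∈ l, p c = false) → l.dropWhile p = l := by
  intro l h
  cases l with
  | nil => rfl
  | cons a t => exact List.dropWhile_cons_of_neg (by simp [h a (by simp)])

theorem pvStrip_nosp (t : List Char) (h : ∀ c ∈ t, PySem.Chars.isspace c = false) :
    PySem.Chars.strip t = t := by
  unfold PySem.Chars.strip PySem.Chars.lstrip PySem.Chars.rstrip
  rw [pvDropWhile_all_false _ t h]
  rw [pvDropWhile_all_false _ t.reverse (fun c hc => h c (by simpa using hc))]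
  simp

theorem pvDropWhile_bws_eq : ∀ (l : List Char), '\n' ∉ l →
    l.dropWhile pvBws = l.dropWhile PySem.Chars.isspace := by
  intro l
  induction l with
  | nil => intro _; rfl
  | cons a t ih =>
    intro h
    have ha : a ≠ '\n' := by intro e; exact h (by simp [e])
    have : pvBws a = PySem.Chars.isspace a := by simp [pvBws, ha]
    by_cases hs : PySem.Chars.isspace a
    · rw [List.dropWhile_cons_of_pos (by rw [this]; exact hs),
        List.dropWhile_cons_of_pos hs]
      exact ih (fun hm => h (by simp [hm]))
    · rw [List.dropWhile_cons_of_neg (by rw [this]; exact hs),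
        List.dropWhile_cons_of_neg hs]

theorem pvBskip_append : ∀ (l r : List Char), '\n' ∉ l → pvBskip (l ++ r) = pvBskip r := by
  intro l
  induction l with
  | nil => intro r _; rfl
  | cons a t ih =>
    intro r h
    have ha : ¬ (a = '\n') := by intro e; exact h (by simp [e])
    rw [List.cons_append, pvBskip, if_neg ha]
    exact ih r (fun hm => h (by simp [hm]))

def pvTrunc (n : List Char) : String := String.ofList ((n.takeWhile (· ≠ '<')).takeWhile (· ≠ '&'))

-- dropping [^\S\n]* from l ++ r, where l is newline-free and r is empty or starts with '\n'
theorem pvT (l r : List Char) (hl : '\n' ∉ l) (hr : r = [] ∨ ∃ r2, r = '\n' :: r2) :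
    (l ++ r).dropWhile pvBws = l.dropWhile PySem.Chars.isspace ++ r := by
  rw [List.dropWhile_append, pvDropWhile_bws_eq l hl]
  by_cases he : (l.dropWhile PySem.Chars.isspace).isEmpty
  · rw [if_pos he]
    rw [List.isEmpty_iff] at he
    rw [he, List.nil_append]
    rcases hr with h | ⟨r2, h⟩ <;> subst h
    · rfl
    · exact List.dropWhile_cons_of_neg (by decide)
  · rw [if_neg he]

theorem pvWords_classdef (rr : List Char) :
    pvWords [] ("classdef ".toList ++ rr) = "classdef".toList :: pvWords [] rr := by
  show pvWords [] ('c'::'l'::'a'::'s'::'s'::'d'::'e'::'f'::' '::rr) = _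
  simp [pvWords,
    show PySem.Chars.isspace 'c' = false from by decide,
    show PySem.Chars.isspace 'l' = false from by decide,
    show PySem.Chars.isspace 'a' = false from by decide,
    show PySem.Chars.isspace 's' = false from by decide,
    show PySem.Chars.isspace 'd' = false from by decide,
    show PySem.Chars.isspace 'e' = false from by decide,
    show PySem.Chars.isspace 'f' = false from by decide,
    show PySem.Chars.isspace ' ' = true from by decide]

theorem pvTakeWhile_rest_nil (rest : List Char) (hr : rest = [] ∨ ∃ r2, rest = '\n' :: r2) :
    rest.takeWhile pvNS = [] := by
  rcases hr with h | ⟨r2, h⟩ <;> subst h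
  · rfl
  · exact List.takeWhile_cons_of_neg (by decide)

theorem pvContinue (n : Nat)
    (ih : ∀ (cs : List Char), cs.length < n →
      pvA_loop (PySem.Chars.splitOn cs ['\n']) = (pvBsearch cs).map pvTrunc)
    (cs line rest : List Char) (hcs : line ++ rest = cs) (hlineNoNl : '\n' ∉ line)
    (hrest : rest = [] ∨ ∃ r2, rest = '\n' :: r2) (hn : cs.length < n + 1) :
    pvA_loop (pvTailC '\n' rest) = (pvBskip cs).map pvTrunc := by
  rcases hrest with hre | ⟨r2, hre⟩ <;> subst hre
  · show pvA_loop (pvTailC '\n' []) = _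
    show pvA_loop [] = _
    rw [← hcs, pvBskip_append line [] hlineNoNl]
    simp [pvA_loop, pvBskip]
  · show pvA_loop (pvSplitC '\n' [] r2) = _

    rw [← hcs, pvBskip_append line _ hlineNoNl]
    have hstep : pvBskip ('\n' :: r2) = pvBsearch r2 := by
      rw [pvBskip]; simp
    rw [hstep, ← splitOn_char]
    refine ih r2 ?_
    have := congrArg List.length hcs
    simp at this
    omega

theorem pvKey : ∀ (n : Nat) (cs : List Char), cs.length < n →
    pvA_loop (PySem.Chars.splitOn cs ['\n']) = (pvBsearch cs).map pvTrunc := by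
  intro n
  induction n with
  | zero => intro cs h; omega
  | succ n ih =>
    intro cs hn
    have hcs : cs.takeWhile (· ≠ '\n') ++ cs.dropWhile (· ≠ '\n') = cs :=
      List.takeWhile_append_dropWhile
    generalize hl : cs.takeWhile (· ≠ '\n') = line at hcs
    generalize hr0 : cs.dropWhile (· ≠ '\n') = rest at hcs
    have hlineNoNl : '\n' ∉ line := by
      intro hm
      rw [← hl] at hm
      have := List.mem_takeWhile_imp hm
      simp at this
    have hrest : rest = [] ∨ ∃ r2, rest = '\n' :: r2 := by
      cases hrc : rest with
      | nil => exact Or.inl rfl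
      | cons d r2 =>
        right
        refine ⟨r2, ?_⟩
        rw [hrc] at hr0
        have := pvHead_dropWhile_false _ cs d r2 hr0
        simp at this
        rw [this]
    have hT1 : cs.dropWhile pvBws = line.dropWhile PySem.Chars.isspace ++ rest := by
      conv_lhs => rw [← hcs]
      exact pvT line rest hlineNoNl hrest
    -- A side: first line split off
    rw [splitOn_char, pvSplitC_eq, hl, hr0]
    simp only [List.reverse_nil, List.nil_append]
    have hcont := pvContinue n ih cs line rest hcs hlineNoNl hrest hn
    rw [pvBsearch]
    show (if PySem.Chars.startswith (PySem.Chars.lstrip line) "classdef ".toList then _ else _) = _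
    by_cases hS : PySem.Chars.startswith (PySem.Chars.lstrip line) "classdef ".toList
    · rw [if_pos hS]
      obtain ⟨rr, hrr⟩ : ∃ rr, PySem.Chars.lstrip line = "classdef ".toList ++ rr := by
        obtain ⟨t, ht⟩ := (PySem.Chars.startswith_iff _ _).mp hS
        exact ⟨t, ht.symm⟩
      have hrrNoNl : '\n' ∉ rr := by
        intro hm
        apply hlineNoNl
        have : '\n' ∈ PySem.Chars.lstrip line := by
          rw [hrr]; exact List.mem_append_right _ hm
        exact (List.dropWhile_sublist _).subset this
      have hBpre : ("classdef ".toList.isPrefixOf (cs.dropWhile pvBws)) = true := by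
        rw [hT1, List.isPrefixOf_iff_prefix]
        show "classdef ".toList <+: PySem.Chars.lstrip line ++ rest
        rw [hrr, List.append_assoc]
        exact List.prefix_append _ _
      have hdrop9 : ((cs.dropWhile pvBws).drop 9) = rr ++ rest := by
        rw [hT1]
        show (PySem.Chars.lstrip line ++ rest).drop 9 = rr ++ rest
        rw [hrr, List.append_assoc]
        have h9 : ("classdef ".toList).length = 9 := by decide
        rw [← h9, List.drop_left]
      have hparts : PySem.Chars.split₀ (PySem.Chars.lstrip line) =
          "classdef".toList :: pvWords [] rr := by
        rw [split₀_eq, hrr, pvWords_classdef]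
      have hT2 : (rr ++ rest).dropWhile pvBws = rr.dropWhile PySem.Chars.isspace ++ rest :=
        pvT rr rest hrrNoNl hrest
      cases hrr' : rr.dropWhile PySem.Chars.isspace with
      | nil =>
        -- no name token on this line: both sides continue
        have hwords : pvWords [] rr = [] := by
          rw [pvWords_skip, hrr']; rfl
        have hTry : pvBtryAt cs = none := by
          unfold pvBtryAt
          simp only [hBpre, if_true, hdrop9, hT2, hrr', List.nil_append]
          have : rest.takeWhile (fun c => !PySem.Chars.isspace c) = [] :=
            pvTakeWhile_rest_nil rest hrest
          simp [this]
        rw [hTry, hparts, hwords]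
        show (if 2 ≤ 1 then _ else pvA_loop (pvTailC '\n' rest)) = _
        rw [if_neg (by omega)]
        exact hcont
      | cons d r2 =>
        have hd : PySem.Chars.isspace d = false := pvHead_dropWhile_false _ rr d r2 hrr'
        have hdNS : pvNS d = true := by simp [pvNS, hd]
        have hwords : pvWords [] rr = (d :: r2.takeWhile pvNS) :: pvWords [] (r2.dropWhile pvNS) := by
          rw [pvWords_skip, hrr']
          show pvWords [] (d :: r2) = _
          rw [show pvWords [] (d :: r2) = pvWords [d] r2 by simp [pvWords, hd]]
          rw [pvWords_head r2 [d] (by simp)]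
          simp
        have htr2 : (r2 ++ rest).takeWhile pvNS = r2.takeWhile pvNS := by
          rw [List.takeWhile_append]
          by_cases hlen : (r2.takeWhile pvNS).length = r2.length
          · rw [if_pos hlen, (List.takeWhile_prefix pvNS).eq_of_length hlen,
              pvTakeWhile_rest_nil rest hrest, List.append_nil]
          · rw [if_neg hlen]
        have hname : ((rr ++ rest).dropWhile pvBws).takeWhile (fun c => !PySem.Chars.isspace c) =
            d :: r2.takeWhile pvNS := by
          rw [hT2, hrr']
          show ((d :: r2) ++ rest).takeWhile pvNS = _
          rw [List.cons_append, List.takeWhile_cons_of_pos hdNS, htr2]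
        have hTry : pvBtryAt cs = some (d :: r2.takeWhile pvNS) := by
          unfold pvBtryAt
          simp only [hBpre, if_true, hdrop9, hname]
          simp
        rw [hTry, hparts, hwords]
        show (if 2 ≤ (("classdef".toList :: (d :: r2.takeWhile pvNS) :: pvWords [] (r2.dropWhile pvNS)).length) then _ else _) = _
        rw [if_pos (by simp)]
        -- both sides are now `some …`
        have hp1 : (PySem.List.pyGet? ("classdef".toList :: (d :: r2.takeWhile pvNS) :: pvWords [] (r2.dropWhile pvNS)) 1).getD [] = d :: r2.takeWhile pvNS := by
          simp [PySem.List.pyGet?, PySem.List.pyIdx?]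
        rw [hp1]
        simp only [splitOn_head]
        have hnosp : ∀ c ∈ (((d :: r2.takeWhile pvNS).takeWhile (· ≠ '<')).takeWhile (· ≠ '&')),
            PySem.Chars.isspace c = false := by
          intro c hc
          have hc1 : c ∈ (d :: r2.takeWhile pvNS).takeWhile (· ≠ '<') :=
            (List.takeWhile_prefix _).subset hc
          have hc2 : c ∈ d :: r2.takeWhile pvNS := (List.takeWhile_prefix _).subset hc1
          rcases List.mem_cons.mp hc2 with h | h
          · rw [h]; exact hd
          · have := List.mem_takeWhile_imp h
            simpa [pvNS] using this
        rw [pvStrip_nosp _ hnosp]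
        rfl
    · rw [if_neg hS]
      have hBpre : ("classdef ".toList.isPrefixOf (cs.dropWhile pvBws)) = false := by
        rw [hT1]
        by_contra h'
        rw [Bool.not_eq_false, List.isPrefixOf_iff_prefix] at h'
        have hnot : ¬ ("classdef ".toList <+: line.dropWhile PySem.Chars.isspace) := by
          intro hc
          exact hS ((PySem.Chars.startswith_iff _ _).mpr hc)
        rcases List.prefix_or_prefix_of_prefix h' (List.prefix_append _ _) with hc | hc
        · exact hnot hc
        · obtain ⟨p2, hp2⟩ := hc
          have hp2pre : p2 <+: rest := by
            rw [← hp2] at h'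
            exact (List.prefix_append_right_inj _).mp h'
          rcases hrest with hre | ⟨r2, hre⟩ <;> subst hre
          · have : p2 = [] := List.prefix_nil.mp hp2pre
            subst this
            exact hnot (by rw [← hp2]; simp)
          · cases p2 with
            | nil => exact hnot (by rw [← hp2]; simp)
            | cons x xs =>
              have hx : x = '\n' := ((List.cons_prefix_cons).mp hp2pre).1
              have hmem : x ∈ "classdef ".toList := by
                rw [← hp2]; simp
              rw [hx] at hmem
              revert hmem
              decide
      have hTry : pvBtryAt cs = none := by
        unfold pvBtryAt
        simp only [hBpre, Bool.false_eq_true, if_false]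
      rw [hTry]
      exact hcont


theorem pvPorts_agree (content : String) :
    extract_classdef_name content = extract_classdef_name_alt content := by
  unfold extract_classdef_name extract_classdef_name_alt
  rw [pvKey (content.toList.length + 1) content.toList (by omega)]
  cases pvBsearch content.toList <;> rfl

-- ===== VERDICT (by name: the statement is the Claim_ definition above) =====
theorem extract_classdef_name_spec : Claim_equal_extract_classdef_name := by
  intro content _
  unfold Spec_extract_classdef_name
  exact pvPorts_agree content
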